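-- pv_equiv track=rewrite | github.com/1ef7yy/university | 2 course/python/3-4/4.py | calculate_negative_product
-- ===== SOURCE A (Python) =====
-- def calculate_negative_product(arr):
--     product = 1
--     has_negatives = False
--     for num in arr:
--         if num < 0:
--             product *= num
--             has_negatives = True
--     return product if has_negatives else 0
-- ===== SOURCE B (Python) =====
-- def calculate_negative_product(arr):
--     # Sign-magnitude decomposition: the product of the negative elements equals
--     # (-1)**count * (product of their absolute values), and is 0-by-convention
--     # when there are no negatives.
--     count = sum(1 for x in arr if x < 0)
--     if count == 0:
--         return 0
--     mag = 1
--     for x in arr: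
--         if x < 0:
--             mag *= -x
--     return -mag if count % 2 else mag
-- ===== Notes on version B (the rewrite author's own statement) =====
-- stated objective: alternative
-- what changed: Replaces the flag-and-multiply loop with a sign-magnitude decomposition: a counting pass over the negatives fixes the sign by parity, a second pass multiplies absolute values, and the sign is applied at the end.
import Mathlib
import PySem

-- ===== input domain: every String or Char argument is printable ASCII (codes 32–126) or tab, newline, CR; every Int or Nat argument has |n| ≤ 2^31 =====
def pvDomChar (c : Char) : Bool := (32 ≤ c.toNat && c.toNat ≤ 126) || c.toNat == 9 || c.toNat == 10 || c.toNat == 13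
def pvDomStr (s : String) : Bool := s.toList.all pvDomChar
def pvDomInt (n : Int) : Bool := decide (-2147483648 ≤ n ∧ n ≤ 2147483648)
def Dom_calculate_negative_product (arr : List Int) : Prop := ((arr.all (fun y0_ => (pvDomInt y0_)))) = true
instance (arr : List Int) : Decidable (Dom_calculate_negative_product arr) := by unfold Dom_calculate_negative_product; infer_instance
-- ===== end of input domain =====

-- B replaces A's flag-and-multiply loop with a sign-magnitude decomposition: a counting pass fixes the sign by parity, a second pass multiplies absolute values; same O(n) cost, alternative algorithm.


-- ===== PORT A =====
def calculate_negative_product (arr : List Int) : Int :=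
  let st := arr.foldl
    (fun (s : Int × Bool) num => if num < 0 then (s.1 * num, true) else s) (1, false)
  if st.2 then st.1 else 0

-- ===== PORT B =====
def calculate_negative_product_alt (arr : List Int) : Int :=
  let count : Int := arr.foldl (fun c x => if x < 0 then c + 1 else c) 0
  if count = 0 then 0
  else
    let mag : Int := arr.foldl (fun m x => if x < 0 then m * (-x) else m) 1
    if count % 2 = 1 then -mag else mag

-- ===== PRECONDITION & SPEC =====
def Spec_calculate_negative_product (arr : List Int) (out : Int) : Prop := out = calculate_negative_product_alt arr
instance (arr : List Int) (out : Int) : Decidable (Spec_calculate_negative_product arr out) := by unfold Spec_calculate_negative_product; infer_instance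

-- ===== CLAIM (what is proved, stated in full; the proofs are below) =====
def Claim_equal_calculate_negative_product : Prop := ∀ (arr : List Int), Dom_calculate_negative_product arr → Spec_calculate_negative_product arr (calculate_negative_product arr)

-- ===== LEMMAS AND PROOFS =====

-- ===== VERDICT (by name: the statement is the Claim_ definition above) =====
lemma cnp_foldl_mul (l : List Int) (a : Int) :
    l.foldl (· * ·) a = a * l.foldl (· * ·) 1 := by
  induction l generalizing a with
  | nil => simp
  | cons x xs ih => simp only [List.foldl_cons]; rw [ih (a * x), ih (1 * x)]; ring

lemma cnp_fold_A (arr : List Int) (p : Int) (b : Bool) :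
    arr.foldl (fun (s : Int × Bool) num => if num < 0 then (s.1 * num, true) else s) (p, b)
      = (p * ((arr.filter (fun x => x < 0)).foldl (· * ·) 1),
         b || !(arr.filter (fun x => x < 0)).isEmpty) := by
  induction arr generalizing p b with
  | nil => simp
  | cons x xs ih =>
    by_cases hx : x < 0 <;> simp only [List.foldl_cons, hx, if_pos,
      List.filter_cons, decide_eq_true_eq] <;> simp [ih]
    rw [cnp_foldl_mul _ x]; ring

lemma cnp_count_fold (arr : List Int) (c : Int) :
    arr.foldl (fun c x => if x < 0 then c + 1 else c) c
      = c + ((arr.filter (fun x => x < 0)).length : Int) := by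
  induction arr generalizing c with
  | nil => simp
  | cons x xs ih => by_cases hx : x < 0 <;> simp [hx, ih] <;> ring

lemma cnp_mag_fold (arr : List Int) (m : Int) :
    arr.foldl (fun m x => if x < 0 then m * (-x) else m) m
      = m * (((arr.filter (fun x => x < 0)).map (fun x => -x)).foldl (· * ·) 1) := by
  induction arr generalizing m with
  | nil => simp
  | cons x xs ih =>
    simp only [List.foldl_cons, List.filter_cons, decide_eq_true_eq]
    by_cases hx : x < 0
    · rw [if_pos hx, if_pos hx, ih (m * -x), List.map_cons, List.foldl_cons,
        cnp_foldl_mul _ (1 * -x)]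
      ring
    · rw [if_neg hx, if_neg hx, ih]

lemma cnp_parity (l : List Int) :
    l.foldl (· * ·) 1
      = (if (l.length : Int) % 2 = 1 then -((l.map (fun x => -x)).foldl (· * ·) 1)
         else (l.map (fun x => -x)).foldl (· * ·) 1) := by
  induction l with
  | nil => simp
  | cons a l ih =>
    simp only [List.foldl_cons, List.map_cons, List.length_cons]
    rw [cnp_foldl_mul l (1 * a), cnp_foldl_mul (l.map (fun x => -x)) (1 * -a), ih]
    have h2 : ((l.length : Int)) % 2 = 0 ∨ ((l.length : Int)) % 2 = 1 := by omega
    rcases h2 with h | h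
    · have h' : (((l.length : Nat) + 1 : Int)) % 2 = 1 := by omega
      push_cast
      rw [if_neg (by omega : ¬ ((l.length : Int)) % 2 = 1), if_pos (by omega)]
      ring
    · have h' : (((l.length : Nat) + 1 : Int)) % 2 = 0 := by omega
      push_cast
      rw [if_pos h, if_neg (by omega)]
      ring

theorem calculate_negative_product_spec : Claim_equal_calculate_negative_product := by
  intro arr _
  unfold Spec_calculate_negative_product calculate_negative_product calculate_negative_product_alt
  simp only [cnp_fold_A, cnp_count_fold, cnp_mag_fold]
  set l := arr.filter (fun x => x < 0) with hl
  by_cases he : l = []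
  · simp [he]
  · have hlen : ((l.length : Int)) ≠ 0 := by
      simpa using fun h => he (List.eq_nil_of_length_eq_zero h)
    have hne : l.isEmpty = false := by simp [he]
    simp only [hne, Bool.not_false, Bool.or_true, if_true, zero_add, one_mul, if_neg hlen]
    rw [cnp_parity l]
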